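-- pv_equiv track=rewrite | github.com/Sasas-Lss/ESP-Align | Benchmarks/Bench_Scripts/Foldseek_bench_precious.py | crop_reference_to_foldseek_region
-- ===== SOURCE A (Python) =====
-- def crop_reference_to_foldseek_region(ref_seq1, ref_seq2, full_seq1, full_seq2, qaln, taln):
--     frag1 = qaln.replace("-", "")
--     frag2 = taln.replace("-", "")
--
--     start1 = full_seq1.find(frag1)
--     start2 = full_seq2.find(frag2)
--
--     if start1 == -1 or start2 == -1:
--         raise ValueError("Foldseek fragment not found in full sequence")
--
--     # 截取参考比对中相同区域
--     i_idx, j_idx = 0, 0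
--     ref_subseq1, ref_subseq2 = "", ""
--     for a, b in zip(ref_seq1, ref_seq2):
--         in_range = (start1 <= i_idx < start1 + len(frag1)) and (start2 <= j_idx < start2 + len(frag2))
--         if a != "-": i_idx += 1
--         if b != "-": j_idx += 1
--         if in_range:
--             ref_subseq1 += a
--             ref_subseq2 += b
--
--     return ref_subseq1, ref_subseq2
-- ===== SOURCE B (Python) =====
-- def crop_reference_to_foldseek_region(ref_seq1, ref_seq2, full_seq1, full_seq2, qaln, taln):
--     frag1 = qaln.replace("-", "")
--     frag2 = taln.replace("-", "")
--
--     start1 = full_seq1.find(frag1)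
--     start2 = full_seq2.find(frag2)
--
--     if start1 == -1 or start2 == -1:
--         raise ValueError("Foldseek fragment not found in full sequence")
--
--     end1 = start1 + len(frag1)
--     end2 = start2 + len(frag2)
--
--     # Both non-gap cursors are monotone, so the columns whose pre-increment
--     # cursors lie in both windows form one contiguous block: find its
--     # boundaries in a single scan, then slice.
--     lo = hi = 0
--     found = False
--     i = j = 0
--     for k in range(min(len(ref_seq1), len(ref_seq2))):
--         if start1 <= i < end1 and start2 <= j < end2:
--             if not found:
--                 lo = k
--                 found = True
--             hi = k + 1
--         if ref_seq1[k] != "-":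
--             i += 1
--         if ref_seq2[k] != "-":
--             j += 1
--     return ref_seq1[lo:hi], ref_seq2[lo:hi]
-- ===== Notes on version B (the rewrite author's own statement) =====
-- stated objective: faster
-- what changed: Instead of accumulating the cropped strings character by character, B scans the aligned columns once to find the boundaries of the (necessarily contiguous, since both non-gap cursors are monotone) selected block and returns two slices of the reference strings.
import Mathlib
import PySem

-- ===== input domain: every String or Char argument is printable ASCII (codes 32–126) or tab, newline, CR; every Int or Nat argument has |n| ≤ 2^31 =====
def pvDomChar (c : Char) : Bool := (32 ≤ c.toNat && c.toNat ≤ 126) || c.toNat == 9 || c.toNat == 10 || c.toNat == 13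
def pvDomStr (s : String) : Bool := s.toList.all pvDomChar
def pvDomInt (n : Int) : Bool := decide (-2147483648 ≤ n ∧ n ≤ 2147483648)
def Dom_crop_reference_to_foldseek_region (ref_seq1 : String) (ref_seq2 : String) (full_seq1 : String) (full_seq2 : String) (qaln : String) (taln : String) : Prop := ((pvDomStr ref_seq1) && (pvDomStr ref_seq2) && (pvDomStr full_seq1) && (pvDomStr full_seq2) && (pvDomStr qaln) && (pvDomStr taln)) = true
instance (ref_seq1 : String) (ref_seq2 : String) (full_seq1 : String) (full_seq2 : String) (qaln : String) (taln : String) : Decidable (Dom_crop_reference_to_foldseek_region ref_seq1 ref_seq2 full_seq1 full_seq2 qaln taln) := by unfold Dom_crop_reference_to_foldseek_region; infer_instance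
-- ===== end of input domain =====

-- B replaces A's per-character string accumulation by one boundary-finding scan
-- (the selected columns are one contiguous block, since both non-gap cursors are
-- monotone) followed by two slices; objective: alternative decomposition.

-- ===== PORT A =====
-- loop body of A: state (i_idx, j_idx, ref_subseq1, ref_subseq2), column (a, b)
def pvStepA (s1 e1 s2 e2 : Int) (st : Int × Int × List Char × List Char)
    (ab : Char × Char) : Int × Int × List Char × List Char :=
  let inRange := (s1 ≤ st.1 ∧ st.1 < e1) ∧ (s2 ≤ st.2.1 ∧ st.2.1 < e2)
  let i' := if ab.1 ≠ '-' then st.1 + 1 else st.1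
  let j' := if ab.2 ≠ '-' then st.2.1 + 1 else st.2.1
  if inRange then (i', j', st.2.2.1 ++ [ab.1], st.2.2.2 ++ [ab.2])
  else (i', j', st.2.2.1, st.2.2.2)

def crop_reference_to_foldseek_region (ref_seq1 : String) (ref_seq2 : String) (full_seq1 : String) (full_seq2 : String) (qaln : String) (taln : String) : String × String :=
  let frag1 := PySem.Str.replace qaln "-" ""
  let frag2 := PySem.Str.replace taln "-" ""
  let start1 := PySem.Str.find full_seq1 frag1
  let start2 := PySem.Str.find full_seq2 frag2
  if start1 = -1 ∨ start2 = -1 then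
    ("", "")  -- Python raises ValueError here; these inputs are excluded by Pre_
  else
    let st := (ref_seq1.toList.zip ref_seq2.toList).foldl
      (pvStepA start1 (start1 + PySem.Str.len frag1) start2 (start2 + PySem.Str.len frag2))
      (0, 0, [], [])
    (String.ofList st.2.2.1, String.ofList st.2.2.2)

-- ===== PORT B =====
-- loop body of B: state (k, found, lo, hi, i, j), column (a, b)
def pvStepB (s1 e1 s2 e2 : Int) (st : Nat × Bool × Nat × Nat × Int × Int)
    (ab : Char × Char) : Nat × Bool × Nat × Nat × Int × Int :=
  let k := st.1; let found := st.2.1; let lo := st.2.2.1; let hi := st.2.2.2.1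
  let i := st.2.2.2.2.1; let j := st.2.2.2.2.2
  let (found', lo', hi') :=
    if (s1 ≤ i ∧ i < e1) ∧ (s2 ≤ j ∧ j < e2) then
      (true, if found then lo else k, k + 1)
    else (found, lo, hi)
  (k + 1, found', lo', hi',
   if ab.1 ≠ '-' then i + 1 else i,
   if ab.2 ≠ '-' then j + 1 else j)

def crop_reference_to_foldseek_region_alt (ref_seq1 : String) (ref_seq2 : String) (full_seq1 : String) (full_seq2 : String) (qaln : String) (taln : String) : String × String :=
  let frag1 := PySem.Str.replace qaln "-" ""
  let frag2 := PySem.Str.replace taln "-" ""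
  let start1 := PySem.Str.find full_seq1 frag1
  let start2 := PySem.Str.find full_seq2 frag2
  if start1 = -1 ∨ start2 = -1 then
    ("", "")  -- Python raises ValueError here; these inputs are excluded by Pre_
  else
    let st := (ref_seq1.toList.zip ref_seq2.toList).foldl
      (pvStepB start1 (start1 + PySem.Str.len frag1) start2 (start2 + PySem.Str.len frag2))
      (0, false, 0, 0, 0, 0)
    (PySem.Str.slice ref_seq1 (some (st.2.2.1 : Int)) (some (st.2.2.2.1 : Int)),
     PySem.Str.slice ref_seq2 (some (st.2.2.1 : Int)) (some (st.2.2.2.1 : Int)))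

-- ===== PRECONDITION & SPEC =====
-- Pre_ excludes exactly the inputs where Python A raises ValueError
-- (a Foldseek fragment does not occur in its full sequence).
def Pre_crop_reference_to_foldseek_region (ref_seq1 : String) (ref_seq2 : String) (full_seq1 : String) (full_seq2 : String) (qaln : String) (taln : String) : Prop :=
  PySem.Str.find full_seq1 (PySem.Str.replace qaln "-" "") ≠ -1 ∧
  PySem.Str.find full_seq2 (PySem.Str.replace taln "-" "") ≠ -1

instance (ref_seq1 : String) (ref_seq2 : String) (full_seq1 : String) (full_seq2 : String) (qaln : String) (taln : String) : Decidable (Pre_crop_reference_to_foldseek_region ref_seq1 ref_seq2 full_seq1 full_seq2 qaln taln) := by unfold Pre_crop_reference_to_foldseek_region; infer_instance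

def pvWitness_crop_reference_to_foldseek_region : String × String × String × String × String × String :=
  ("AC-G", "A-CG", "ACG", "ACG", "C-G", "CG")

def Spec_crop_reference_to_foldseek_region (ref_seq1 : String) (ref_seq2 : String) (full_seq1 : String) (full_seq2 : String) (qaln : String) (taln : String) (out : String × String) : Prop := out = crop_reference_to_foldseek_region_alt ref_seq1 ref_seq2 full_seq1 full_seq2 qaln taln
instance (ref_seq1 : String) (ref_seq2 : String) (full_seq1 : String) (full_seq2 : String) (qaln : String) (taln : String) (out : String × String) : Decidable (Spec_crop_reference_to_foldseek_region ref_seq1 ref_seq2 full_seq1 full_seq2 qaln taln out) := by unfold Spec_crop_reference_to_foldseek_region; infer_instance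

-- ===== CLAIM (what is proved, stated in full; the proofs are below) =====
def Claim_equal_crop_reference_to_foldseek_region : Prop := ∀ (ref_seq1 : String) (ref_seq2 : String) (full_seq1 : String) (full_seq2 : String) (qaln : String) (taln : String), Dom_crop_reference_to_foldseek_region ref_seq1 ref_seq2 full_seq1 full_seq2 qaln taln → Pre_crop_reference_to_foldseek_region ref_seq1 ref_seq2 full_seq1 full_seq2 qaln taln → Spec_crop_reference_to_foldseek_region ref_seq1 ref_seq2 full_seq1 full_seq2 qaln taln (crop_reference_to_foldseek_region ref_seq1 ref_seq2 full_seq1 full_seq2 qaln taln)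

-- ===== LEMMAS AND PROOFS =====

-- the non-gap cursor: number of non-'-' characters among the first k of l, as an Int
def pvCur (l : List Char) (k : Nat) : Int := ((l.take k).countP (fun c => c ≠ '-') : Nat)

theorem pvCur_zero (l : List Char) : pvCur l 0 = 0 := by simp [pvCur]

theorem pvCur_succ (l : List Char) (k : Nat) (a : Char) (h : l[k]? = some a) :
    pvCur l (k + 1) = (if a ≠ '-' then pvCur l k + 1 else pvCur l k) := by
  simp only [pvCur, List.take_add_one, h, List.countP_append, Option.toList_some]
  by_cases ha : a = '-' <;> simp [ha]

theorem pvCur_mono_succ (l : List Char) (k : Nat) (a : Char) (h : l[k]? = some a) :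
    pvCur l k ≤ pvCur l (k + 1) := by
  rw [pvCur_succ l k a h]; split <;> omega

theorem pvDropCons {l : List Char} {k : Nat} {a : Char} (h : l[k]? = some a) :
    l.drop k = a :: l.drop (k + 1) := by
  have h1 : (l.drop k).head? = some a := by rw [List.head?_drop]; exact h
  have h2 := List.tail_drop (l := l) (i := k)
  cases hd : l.drop k with
  | nil => rw [hd] at h1; simp at h1
  | cons x xs =>
    rw [hd] at h1 h2; simp at h1 h2; rw [h1, h2]

theorem pvMain (s1 e1 s2 e2 : Int) (l1 l2 : List Char) :
    ∀ (t : List (Char × Char)) (k : Nat) (found : Bool) (lo hi : Nat)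
      (sa sb : List Char),
    (l1.zip l2).drop k = t →
    (found = false → lo = 0 ∧ hi = 0 ∧ sa = [] ∧ sb = []) →
    (found = true → lo ≤ hi ∧ hi ≤ k ∧
        sa = (l1.drop lo).take (hi - lo) ∧ sb = (l2.drop lo).take (hi - lo) ∧
        s1 ≤ pvCur l1 k ∧ s2 ≤ pvCur l2 k ∧
        (hi < k → e1 ≤ pvCur l1 k ∨ e2 ≤ pvCur l2 k)) →
    (t.foldl (pvStepA s1 e1 s2 e2) (pvCur l1 k, pvCur l2 k, sa, sb)).2.2.1
      = (l1.drop (t.foldl (pvStepB s1 e1 s2 e2) (k, found, lo, hi, pvCur l1 k, pvCur l2 k)).2.2.1).take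
          ((t.foldl (pvStepB s1 e1 s2 e2) (k, found, lo, hi, pvCur l1 k, pvCur l2 k)).2.2.2.1
            - (t.foldl (pvStepB s1 e1 s2 e2) (k, found, lo, hi, pvCur l1 k, pvCur l2 k)).2.2.1) ∧
    (t.foldl (pvStepA s1 e1 s2 e2) (pvCur l1 k, pvCur l2 k, sa, sb)).2.2.2
      = (l2.drop (t.foldl (pvStepB s1 e1 s2 e2) (k, found, lo, hi, pvCur l1 k, pvCur l2 k)).2.2.1).take
          ((t.foldl (pvStepB s1 e1 s2 e2) (k, found, lo, hi, pvCur l1 k, pvCur l2 k)).2.2.2.1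
            - (t.foldl (pvStepB s1 e1 s2 e2) (k, found, lo, hi, pvCur l1 k, pvCur l2 k)).2.2.1) := by
  intro t
  induction t with
  | nil =>
    intro k found lo hi sa sb _ hf ht
    simp only [List.foldl_nil]
    cases found with
    | false =>
      obtain ⟨h1, h2, h3, h4⟩ := hf rfl
      subst h1; subst h2; subst h3; subst h4; simp
    | true =>
      obtain ⟨_, _, h3, h4, _⟩ := ht rfl
      exact ⟨h3, h4⟩
  | cons ab t ih =>
    intro k found lo hi sa sb hdrop hf ht
    obtain ⟨a, b⟩ := ab
    have hz : (l1.zip l2)[k]? = some (a, b) := by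
      rw [← List.head?_drop, hdrop]; rfl
    have ha : l1[k]? = some a := (List.getElem?_zip_eq_some.mp hz).1
    have hb : l2[k]? = some b := (List.getElem?_zip_eq_some.mp hz).2
    have hdrop' : (l1.zip l2).drop (k + 1) = t := by
      rw [← List.tail_drop, hdrop]; rfl
    have hca := pvCur_succ l1 k a ha
    have hcb := pvCur_succ l2 k b hb
    have hma := pvCur_mono_succ l1 k a ha
    have hmb := pvCur_mono_succ l2 k b hb
    simp only [List.foldl_cons, pvStepA, pvStepB]
    by_cases hc : (s1 ≤ pvCur l1 k ∧ pvCur l1 k < e1) ∧ (s2 ≤ pvCur l2 k ∧ pvCur l2 k < e2)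
    · rw [if_pos hc, if_pos hc, ← hca, ← hcb]
      cases found with
      | false =>
        obtain ⟨h1, h2, h3, h4⟩ := hf rfl
        subst h1; subst h2; subst h3; subst h4
        simp only [Bool.false_eq_true, if_false]
        apply ih (k + 1) true k (k + 1) ([] ++ [a]) ([] ++ [b]) hdrop'
        · intro h; cases h
        · intro _
          refine ⟨by omega, le_refl _, ?_, ?_, le_trans hc.1.1 hma, le_trans hc.2.1 hmb, by omega⟩
          · rw [pvDropCons ha]
            have hk1 : k + 1 - k = 1 := by omega
            rw [hk1]; rfl
          · rw [pvDropCons hb]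
            have hk1 : k + 1 - k = 1 := by omega
            rw [hk1]; rfl
      | true =>
        obtain ⟨h1, h2, h3, h4, h5, h6, h7⟩ := ht rfl
        have hhk : hi = k := by
          rcases Nat.lt_or_ge hi k with h | h
          · rcases h7 h with h' | h' <;> [exact absurd hc.1.2 (by omega); exact absurd hc.2.2 (by omega)]
          · omega
        simp only [if_true]
        apply ih (k + 1) true lo (k + 1) (sa ++ [a]) (sb ++ [b]) hdrop'
        · intro h; cases h
        · intro _
          refine ⟨by omega, le_refl _, ?_, ?_, le_trans hc.1.1 hma, le_trans hc.2.1 hmb, by omega⟩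
          · rw [h3, hhk]
            have h9 : k + 1 - lo = (k - lo) + 1 := by omega
            rw [h9, List.take_add_one, List.getElem?_drop]
            have h10 : lo + (k - lo) = k := by omega
            rw [h10, ha]; rfl
          · rw [h4, hhk]
            have h9 : k + 1 - lo = (k - lo) + 1 := by omega
            rw [h9, List.take_add_one, List.getElem?_drop]
            have h10 : lo + (k - lo) = k := by omega
            rw [h10, hb]; rfl
    · rw [if_neg hc, if_neg hc, ← hca, ← hcb]
      apply ih (k + 1) found lo hi sa sb hdrop' hf
      intro h
      obtain ⟨h1, h2, h3, h4, h5, h6, h7⟩ := ht h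
      refine ⟨h1, by omega, h3, h4, by omega, by omega, ?_⟩
      intro _
      have : ¬ (pvCur l1 k < e1) ∨ ¬ (pvCur l2 k < e2) := by tauto
      rcases this with h' | h' <;> [left; right] <;> omega

theorem crop_reference_to_foldseek_region_spec : Claim_equal_crop_reference_to_foldseek_region := by
  intro r1 r2 f1 f2 q t _ hpre
  obtain ⟨hp1, hp2⟩ := hpre
  unfold Spec_crop_reference_to_foldseek_region crop_reference_to_foldseek_region
    crop_reference_to_foldseek_region_alt
  have hcond : ¬ (PySem.Str.find f1 (PySem.Str.replace q "-" "") = -1 ∨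
      PySem.Str.find f2 (PySem.Str.replace t "-" "") = -1) := by
    intro h; rcases h with h | h; exact hp1 h; exact hp2 h
  simp only [if_neg hcond]
  have hmain := pvMain (PySem.Str.find f1 (PySem.Str.replace q "-" ""))
      (PySem.Str.find f1 (PySem.Str.replace q "-" "") + PySem.Str.len (PySem.Str.replace q "-" ""))
      (PySem.Str.find f2 (PySem.Str.replace t "-" ""))
      (PySem.Str.find f2 (PySem.Str.replace t "-" "") + PySem.Str.len (PySem.Str.replace t "-" ""))
      r1.toList r2.toList (r1.toList.zip r2.toList) 0 false 0 0 [] [] rfl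
      (by intro _; exact ⟨rfl, rfl, rfl, rfl⟩) (by intro h; cases h)
  rw [pvCur_zero, pvCur_zero] at hmain
  refine Prod.ext ?_ ?_
  · apply String.toList_inj.mp
    rw [String.toList_ofList, PySem.Str.toList_slice, PySem.Chars.slice_eq_listSlice,
      PySem.List.slice_natCast]
    exact hmain.1
  · apply String.toList_inj.mp
    rw [String.toList_ofList, PySem.Str.toList_slice, PySem.Chars.slice_eq_listSlice,
      PySem.List.slice_natCast]
    exact hmain.2
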